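-- pv_equiv track=rewrite | github.com/jltwheeler/advent-of-code | day_11/day_11.py | part_two
-- ===== SOURCE A (Python) =====
-- def part_two(inputs: list) -> int:
--     prev = ""
--     new = "\n".join("".join(line) for line in inputs)
--
--     while prev != new:
--         prev = new
--         new_seats = []
--
--         for i, line in enumerate(inputs):
--             new_row = []
--             for j in range(len(line)):
--                 if line[j] == ".":
--                     new_row.append(".")
--                     continue
--
--                 count = 0
--                 dist_left = j - 0
--                 dist_right = len(line) - 1 - j
--                 dist_up = i - 0
--                 dist_down = len(inputs) - 1 - i
--                 for dir in [
--                     [(0, 1)] * dist_down,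
--                     [(1, 0)] * dist_right,
--                     [(-1, 0)] * dist_left,
--                     [(0, -1)] * dist_up,
--                     [(1, 1)] * min(dist_right, dist_down),
--                     [(1, -1)] * min(dist_right, dist_up),
--                     [(-1, 1)] * min(dist_left, dist_down),
--                     [(-1, -1)] * min(dist_left, dist_up),
--                 ]:
--                     for m, (dx, dy) in enumerate(dir, 1):
--                         if i + dy * m >= 0 and j + dx * m >= 0:
--                             try:
--                                 if inputs[i + dy * m][j + dx * m] == "#":
--                                     count += 1
--                                     break
--                                 elif inputs[i + dy * m][j + dx * m] == "L":
--                                     break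
--                             except IndexError:
--                                 pass
--
--                 if count >= 5:
--                     new_row.append("L")
--                 elif count == 0:
--                     new_row.append("#")
--                 else:
--                     new_row.append(inputs[i][j])
--             new_seats.append(new_row)
--         inputs = new_seats
--
--         new = "\n".join("".join(line) for line in inputs)
--
--     return new.count("#")
-- ===== SOURCE B (Python) =====
-- def part_two(inputs: list) -> int:
--     grid = [list(line) for line in inputs]
--     h = len(grid)
--     # one-time geometry pass: for every seat (non-'.') cell, the 8 sight rays as
--     # index lists, keeping only positions that exist and hold a seat
--     info = []
--     for i, row in enumerate(grid):
--         w = len(row)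
--         irow = []
--         for j, ch in enumerate(row):
--             if ch == '.':
--                 irow.append(None)
--                 continue
--             dl, dr, du, dd = j, w - 1 - j, i, h - 1 - i
--             rays = []
--             for dx, dy, dist in ((0, 1, dd), (1, 0, dr), (-1, 0, dl), (0, -1, du),
--                                  (1, 1, min(dr, dd)), (1, -1, min(dr, du)),
--                                  (-1, 1, min(dl, dd)), (-1, -1, min(dl, du))):
--                 ray = []
--                 for m in range(1, dist + 1):
--                     r, c = i + dy * m, j + dx * m
--                     if c < len(grid[r]):
--                         ch2 = grid[r][c]
--                         if ch2 != '.':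
--                             ray.append((r, c))
--                             if ch2 == '#' or ch2 == 'L':
--                                 break  # cells behind a seat that starts occupied/empty
--                                        # can never be seen: L/# cells stay L/#
--                 rays.append(ray)
--             irow.append(rays)
--         info.append(irow)
--
--     while True:
--         new = []
--         for irow, row in zip(info, grid):
--             nrow = []
--             for rays, cur in zip(irow, row):
--                 if rays is None:
--                     nrow.append('.')
--                     continue
--                 cnt = 0
--                 for ray in rays:
--                     for r, c in ray:
--                         ch = grid[r][c]
--                         if ch == '#':
--                             cnt += 1
--                             break
--                         elif ch == 'L':
--                             break
--                 nrow.append('L' if cnt >= 5 else '#' if cnt == 0 else cur)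
--             new.append(nrow)
--         if new == grid:
--             break
--         grid = new
--     return sum(row.count('#') for row in grid)
-- ===== Notes on version B (the rewrite author's own statement) =====
-- stated objective: faster
-- what changed: B precomputes once, per seat, the 8 lines of sight as fixed index lists (dropping floor cells and cutting each line at the first seat that starts occupied/empty, which can never be seen past), then iterates the seating rule over that static table, instead of A re-deriving and re-scanning all 8 direction vectors with try/except on every cell of every iteration; intended as faster, measured ~2-2.9x on a timing run's generated grids (unconfirmed at the largest size, where both timed out).
import Mathlib
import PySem

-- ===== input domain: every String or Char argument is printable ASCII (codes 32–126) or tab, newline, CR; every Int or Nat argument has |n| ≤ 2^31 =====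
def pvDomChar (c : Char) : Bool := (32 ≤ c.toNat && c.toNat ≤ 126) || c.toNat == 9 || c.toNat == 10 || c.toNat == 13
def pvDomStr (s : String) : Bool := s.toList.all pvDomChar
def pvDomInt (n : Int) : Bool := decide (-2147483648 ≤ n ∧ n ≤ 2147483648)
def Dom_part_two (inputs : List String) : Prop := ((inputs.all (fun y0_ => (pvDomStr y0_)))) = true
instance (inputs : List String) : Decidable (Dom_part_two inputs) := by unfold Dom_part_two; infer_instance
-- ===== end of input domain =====

-- B precomputes each seat's 8 sight rays once (truncated at the first cell that starts
-- as 'L'/'#', which stays 'L'/'#' forever) and iterates on that fixed table; return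
-- value only — neither program mutates its argument.  Both loop ports use a fuel
-- argument (3 ^ number-of-cells + 1, enough for any terminating run, since each cell
-- ranges over at most 3 values) purely as a structural-recursion guard.

-- ===== PORT A =====
-- inputs[r][c] under the 'r >= 0 and c >= 0' guard of A; the IndexError caught by A's
-- try/except is exactly the 'none' of getElem? (indices are non-negative here, so
-- .toNat is exact).
def cellAtA (g : List (List Char)) (r c : Int) : Option Char :=
  (g[r.toNat]?).bind (fun row => row[c.toNat]?)

-- 'for m, (dx, dy) in enumerate(dir, 1): … break' over one direction list
def scanDirA (g : List (List Char)) (i j : Int) : List (Int × Int) → Int → Int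
  | [], _ => 0
  | (dx, dy) :: rest, m =>
    if 0 ≤ i + dy * m ∧ 0 ≤ j + dx * m then
      match cellAtA g (i + dy * m) (j + dx * m) with
      | none => scanDirA g i j rest (m + 1)      -- IndexError: 'pass'
      | some ch =>
        if ch = '#' then 1 else if ch = 'L' then 0 else scanDirA g i j rest (m + 1)
    else scanDirA g i j rest (m + 1)

-- body of A's inner 'for j in range(len(line))' loop
def cellA (g : List (List Char)) (h i : Nat) (line : List Char) (j : Nat) : Char :=
  if line.getD j ' ' = '.' then '.'
  else
    let dl : Int := j
    let dr : Int := (line.length : Int) - 1 - j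
    let du : Int := i
    let dd : Int := (h : Int) - 1 - i
    -- the eight '[(dx, dy)] * dist' lists, in A's order ([(dx,dy)]*n = replicate n.toNat)
    let dirs : List (Nat × Int × Int) :=
      [(dd.toNat, 0, 1), (dr.toNat, 1, 0), (dl.toNat, -1, 0), (du.toNat, 0, -1),
       ((min dr dd).toNat, 1, 1), ((min dr du).toNat, 1, -1),
       ((min dl dd).toNat, -1, 1), ((min dl du).toNat, -1, -1)]
    let count : Int :=
      dirs.foldl (fun acc d => acc + scanDirA g i j (List.replicate d.1 d.2) 1) 0
    if count ≥ 5 then 'L' else if count = 0 then '#' else (g.getD i []).getD j ' '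

def stepA (g : List (List Char)) : List (List Char) :=
  (PySem.List.enumerate g 0).map (fun p =>
    (List.range p.2.length).foldl (fun acc j => acc ++ [cellA g g.length p.1.toNat p.2 j]) [])

-- '"\n".join("".join(line) for line in inputs)'; the inner "".join of a row of chars is
-- that row itself (PySem.Chars.join_nil_singletons), so only the outer join remains.
def renderA (g : List (List Char)) : List Char := PySem.Chars.join ['\n'] g

def loopA : Nat → List Char → List (List Char) → Int
  | 0, _, g => (PySem.Chars.count (renderA g) ['#'] : Int)   -- fuel guard only
  | f + 1, prev, g =>
    let new := renderA g
    if prev = new then (PySem.Chars.count new ['#'] : Int)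
    else loopA f new (stepA g)

def part_two (inputs : List String) : Int :=
  let g := inputs.map (·.toList)
  loopA (3 ^ (g.map List.length).sum + 1) [] g

-- ===== PORT B =====
-- one precomputed ray: positions of the existing non-'.' cells along a direction,
-- stopping after the first cell that is 'L' or '#' in the initial grid
def rayB (g0 : List (List Char)) (i j dx dy : Int) : Nat → Int → List (Nat × Nat)
  | 0, _ => []
  | d + 1, m =>
    let r := i + dy * m
    let c := j + dx * m
    let row := g0.getD r.toNat []
    if c < (row.length : Int) then
      let ch := row.getD c.toNat ' '
      if ch = '.' then rayB g0 i j dx dy d (m + 1)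
      else if ch = '#' ∨ ch = 'L' then [(r.toNat, c.toNat)]
      else (r.toNat, c.toNat) :: rayB g0 i j dx dy d (m + 1)
    else rayB g0 i j dx dy d (m + 1)

def raysB (g0 : List (List Char)) (h i w j : Nat) : List (List (Nat × Nat)) :=
  let dl : Int := j
  let dr : Int := (w : Int) - 1 - j
  let du : Int := i
  let dd : Int := (h : Int) - 1 - i
  [rayB g0 i j 0 1 dd.toNat 1, rayB g0 i j 1 0 dr.toNat 1,
   rayB g0 i j (-1) 0 dl.toNat 1, rayB g0 i j 0 (-1) du.toNat 1,
   rayB g0 i j 1 1 (min dr dd).toNat 1, rayB g0 i j 1 (-1) (min dr du).toNat 1,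
   rayB g0 i j (-1) 1 (min dl dd).toNat 1, rayB g0 i j (-1) (-1) (min dl du).toNat 1]

-- the 'info' table: one entry per cell, none for '.', the eight rays otherwise
def infoB (g0 : List (List Char)) : List (List (Option (List (List (Nat × Nat))))) :=
  (PySem.List.enumerate g0 0).map (fun p =>
    (PySem.List.enumerate p.2 0).map (fun q =>
      if q.2 = '.' then none else some (raysB g0 g0.length p.1.toNat p.2.length q.1.toNat)))

-- 'for r, c in ray: … break': 1 if the first visible seat is '#', else 0
def scanRayB (g : List (List Char)) : List (Nat × Nat) → Int
  | [] => 0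
  | (r, c) :: rest =>
    let ch := (g.getD r []).getD c ' '
    if ch = '#' then 1 else if ch = 'L' then 0 else scanRayB g rest

def cellB (g : List (List Char)) (entry : Option (List (List (Nat × Nat)))) (cur : Char) : Char :=
  match entry with
  | none => '.'
  | some rays =>
    let cnt : Int := rays.foldl (fun acc ray => acc + scanRayB g ray) 0
    if cnt ≥ 5 then 'L' else if cnt = 0 then '#' else cur

def stepB (info : List (List (Option (List (List (Nat × Nat)))))) (g : List (List Char)) :
    List (List Char) :=
  (info.zip g).map (fun p => (p.1.zip p.2).map (fun q => cellB g q.1 q.2))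

-- 'sum(row.count('#') for row in grid)'
def countB (g : List (List Char)) : Int :=
  (g.map (fun row => (PySem.List.count row '#' : Int))).sum

def loopB (info : List (List (Option (List (List (Nat × Nat)))))) :
    Nat → List (List Char) → Int
  | 0, g => countB g   -- fuel guard only
  | f + 1, g =>
    let new := stepB info g
    if new = g then countB g
    else loopB info f new

def part_two_alt (inputs : List String) : Int :=
  let g := inputs.map (·.toList)
  loopB (infoB g) (3 ^ (g.map List.length).sum + 1) g

-- ===== PRECONDITION & SPEC =====
def Spec_part_two (inputs : List String) (out : Int) : Prop := out = part_two_alt inputs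
instance (inputs : List String) (out : Int) : Decidable (Spec_part_two inputs out) := by unfold Spec_part_two; infer_instance

-- ===== CLAIM (what is proved, stated in full; the proofs are below) =====
def Claim_equal_part_two : Prop := ∀ (inputs : List String), Dom_part_two inputs → Spec_part_two inputs (part_two inputs)

-- ===== LEMMAS AND PROOFS =====

def Compat (g0 g : List (List Char)) : Prop :=
  g.map List.length = g0.map List.length ∧
  ∀ i j : Nat,
    (g.getD i []).getD j ' ' = (g0.getD i []).getD j ' ' ∨
    ((g0.getD i []).getD j ' ' ≠ '.' ∧
      ((g.getD i []).getD j ' ' = 'L' ∨ (g.getD i []).getD j ' ' = '#'))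

theorem row_len_eq {g0 g : List (List Char)} (h : g.map List.length = g0.map List.length)
    (n : Nat) : (g.getD n []).length = (g0.getD n []).length := by
  have h1 := congrArg (fun l => l.getD n (List.length ([] : List Char))) h
  simp only [List.getD_eq_getElem?_getD, List.getElem?_map] at h1
  cases hg : g[n]? <;> cases hg0 : g0[n]? <;>
    simp [List.getD_eq_getElem?_getD, hg, hg0] at h1 ⊢ <;> simp [h1]

theorem scan_eq (g0 g : List (List Char)) (hC : Compat g0 g) (i j dx dy : Int)
    (d : Nat) (m : Int)
    (hb : ∀ k : Int, m ≤ k → k < m + d →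
      0 ≤ i + dy * k ∧ i + dy * k < (g.length : Int) ∧ 0 ≤ j + dx * k) :
    scanDirA g i j (List.replicate d (dx, dy)) m = scanRayB g (rayB g0 i j dx dy d m) := by
  induction d generalizing m with
  | zero => simp [scanDirA, rayB, scanRayB]
  | succ d ih =>
    obtain ⟨hr0, hrlt, hc0⟩ := hb m le_rfl (by omega)
    have ihm := ih (m + 1) (fun k h1 h2 => hb k (by omega) (by push_cast at h2 ⊢; omega))
    have hrn : (i + dy * m).toNat < g.length := by omega
    have hrow : g[(i + dy * m).toNat]? = some (g.getD (i + dy * m).toNat []) := by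
      rw [List.getD_eq_getElem?_getD, List.getElem?_eq_getElem hrn]; rfl
    have hlen := row_len_eq hC.1 (i + dy * m).toNat
    rw [List.replicate_succ]
    simp only [scanDirA, rayB, cellAtA]
    rw [if_pos ⟨hr0, hc0⟩, hrow]
    simp only [Option.bind_some]
    by_cases hcin : j + dx * m < ((g0.getD (i + dy * m).toNat []).length : Int)
    · rw [if_pos hcin]
      have hcn : (j + dx * m).toNat < (g.getD (i + dy * m).toNat []).length := by omega
      have hget : (g.getD (i + dy * m).toNat [])[(j + dx * m).toNat]?
          = some ((g.getD (i + dy * m).toNat []).getD (j + dx * m).toNat ' ') := by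
        simp only [List.getD_eq_getElem?_getD]
        rw [List.getElem?_eq_getElem (by simpa [List.getD_eq_getElem?_getD] using hcn)]
        simp
      rw [hget]
      have hinv := hC.2 (i + dy * m).toNat (j + dx * m).toNat
      generalize hchg : (g.getD (i + dy * m).toNat []).getD (j + dx * m).toNat ' ' = chg at hinv ⊢
      by_cases h0dot : (g0.getD (i + dy * m).toNat []).getD (j + dx * m).toNat ' ' = '.'
      · have hgdot : chg = '.' := by
          rcases hinv with h | ⟨hne, _⟩
          · rw [h, h0dot]
          · exact absurd h0dot hne
        rw [if_pos h0dot, hgdot]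
        norm_num
        exact ihm
      · rw [if_neg h0dot]
        by_cases h0blk : (g0.getD (i + dy * m).toNat []).getD (j + dx * m).toNat ' ' = '#'
            ∨ (g0.getD (i + dy * m).toNat []).getD (j + dx * m).toNat ' ' = 'L'
        · rw [if_pos h0blk]
          have hgblk : chg = 'L' ∨ chg = '#' := by
            rcases hinv with h | ⟨_, hbk⟩
            · rw [h]; tauto
            · exact hbk
          simp only [scanRayB]
          rw [hchg]
          rcases hgblk with h | h <;> simp [h]
        · rw [if_neg h0blk]
          simp only [scanRayB]
          rw [hchg]
          by_cases hgh : chg = '#'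
          · simp [hgh]
          · by_cases hgl : chg = 'L'
            · simp [hgl]
            · simp [hgh, hgl]
              exact ihm
    · rw [if_neg hcin]
      have hnone : (g.getD (i + dy * m).toNat [])[(j + dx * m).toNat]? = none := by
        rw [List.getElem?_eq_none_iff]; omega
      rw [hnone]
      exact ihm

theorem glen_eq {g0 g : List (List Char)} (h : g.map List.length = g0.map List.length) :
    g0.length = g.length := by
  have := congrArg List.length h; simpa using this.symm

theorem cell_eq (g0 g : List (List Char)) (hC : Compat g0 g) (i j : Nat)
    (hi : i < g.length) (_hj : j < (g.getD i []).length) :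
    cellA g g.length i (g.getD i []) j =
      cellB g (if (g0.getD i []).getD j ' ' = '.' then none
               else some (raysB g0 g0.length i (g0.getD i []).length j))
        ((g.getD i []).getD j ' ') := by
  have hglen : g0.length = g.length := glen_eq hC.1
  have hrl := row_len_eq hC.1 i
  have hinv := hC.2 i j
  by_cases h0dot : (g0.getD i []).getD j ' ' = '.'
  · have hgdot : (g.getD i []).getD j ' ' = '.' := by
      rcases hinv with h | ⟨hne, _⟩
      · rw [h, h0dot]
      · exact absurd h0dot hne
    rw [if_pos h0dot]
    simp only [List.getD_eq_getElem?_getD] at hgdot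
    simp [cellA, cellB, hgdot]
  · have hgdot : (g.getD i []).getD j ' ' ≠ '.' := by
      rcases hinv with h | ⟨_, hbk⟩
      · rw [h]; exact h0dot
      · rcases hbk with h | h <;> rw [h] <;> decide
    rw [if_neg h0dot]
    simp only [cellA, cellB, raysB, if_neg hgdot]
    rw [hglen, hrl]
    have hscan : ∀ (dx dy : Int) (d : Nat),
        (∀ k : Int, 1 ≤ k → k < 1 + d →
          0 ≤ (i : Int) + dy * k ∧ (i : Int) + dy * k < (g.length : Int) ∧ 0 ≤ (j : Int) + dx * k) →
        scanDirA g i j (List.replicate d (dx, dy)) 1 = scanRayB g (rayB g0 i j dx dy d 1) :=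
      fun dx dy d hb => scan_eq g0 g hC i j dx dy d 1 hb
    simp only [List.foldl]
    simp only [hscan 0 1 ((g.length : Int) - 1 - i).toNat (by intro k h1 h2; omega),
        hscan 1 0 (((g0.getD i []).length : Int) - 1 - j).toNat (by intro k h1 h2; omega),
        hscan (-1) 0 ((j : Int)).toNat (by intro k h1 h2; omega),
        hscan 0 (-1) ((i : Int)).toNat (by intro k h1 h2; omega),
        hscan 1 1 (min (((g0.getD i []).length : Int) - 1 - j) ((g.length : Int) - 1 - i)).toNat
          (by intro k h1 h2; omega),
        hscan 1 (-1) (min (((g0.getD i []).length : Int) - 1 - j) ((i : Int))).toNat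
          (by intro k h1 h2; omega),
        hscan (-1) 1 (min ((j : Int)) ((g.length : Int) - 1 - i)).toNat
          (by intro k h1 h2; omega),
        hscan (-1) (-1) (min ((j : Int)) ((i : Int))).toNat (by intro k h1 h2; omega)]
    rfl

theorem step_eq (g0 g : List (List Char)) (hC : Compat g0 g) :
    stepA g = stepB (infoB g0) g := by
  have hglen : g0.length = g.length := glen_eq hC.1
  have hrows : ∀ n : Nat, (g.getD n []).length = (g0.getD n []).length := row_len_eq hC.1
  simp only [stepA, stepB, infoB, PySem.List.foldl_append_singleton_eq_map, List.nil_append]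
  apply List.ext_getElem
  · simp [PySem.List.length_enumerate, hglen]
  · intro i h1 h2
    simp only [List.getElem_map, PySem.List.getElem_enumerate, List.getElem_zip]
    have hi : i < g.length := by
      simpa [PySem.List.length_enumerate] using h1
    have hi0 : i < g0.length := by omega
    have hrl : g[i].length = g0[i].length := by
      have := hrows i
      rwa [List.getD_eq_getElem g [] hi, List.getD_eq_getElem g0 [] hi0] at this
    apply List.ext_getElem
    · simp [PySem.List.length_enumerate, hrl]
    · intro j hj1 hj2
      simp only [List.getElem_map, PySem.List.getElem_enumerate, List.getElem_zip,
        List.getElem_range, zero_add, Int.toNat_natCast]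
      have hj : j < g[i].length := by simpa using hj1
      have hj0 : j < g0[i].length := by omega
      have hcell := cell_eq g0 g hC i j hi
        (by rwa [List.getD_eq_getElem g [] hi])
      rw [List.getD_eq_getElem g [] hi, List.getD_eq_getElem g0 [] hi0,
        List.getD_eq_getElem g[i] ' ' hj, List.getD_eq_getElem g0[i] ' ' hj0] at hcell
      exact hcell

theorem getD_oob {α : Type} (l : List α) (n : Nat) (d : α) (h : l.length ≤ n) :
    l.getD n d = d := by
  rw [List.getD_eq_getElem?_getD, List.getElem?_eq_none_iff.2 h]; rfl

theorem shape_stepA (g : List (List Char)) :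
    (stepA g).map List.length = g.map List.length := by
  simp only [stepA, PySem.List.foldl_append_singleton_eq_map, List.nil_append]
  apply List.ext_getElem
  · simp [PySem.List.length_enumerate]
  · intro i h1 h2
    simp [PySem.List.getElem_enumerate]

theorem stepA_cell (g : List (List Char)) (i j : Nat) (hi : i < g.length)
    (hj : j < g[i].length) :
    ((stepA g).getD i []).getD j ' ' = cellA g g.length i g[i] j := by
  have hlen : i < (stepA g).length := by
    simp [stepA, PySem.List.length_enumerate, hi]
  rw [List.getD_eq_getElem (stepA g) [] hlen]
  have hjlen : j < (stepA g)[i].length := by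
    simp only [stepA, PySem.List.foldl_append_singleton_eq_map, List.nil_append,
      List.getElem_map, PySem.List.getElem_enumerate]
    simpa using hj
  rw [List.getD_eq_getElem (stepA g)[i] ' ' hjlen]
  simp only [stepA, PySem.List.foldl_append_singleton_eq_map, List.nil_append,
    List.getElem_map, PySem.List.getElem_enumerate, List.getElem_range, zero_add,
    Int.toNat_natCast]

theorem cellA_vals (g : List (List Char)) (h i : Nat) (line : List Char) (j : Nat) :
    (line.getD j ' ' = '.' ∧ cellA g h i line j = '.') ∨
    (line.getD j ' ' ≠ '.' ∧ (cellA g h i line j = 'L' ∨ cellA g h i line j = '#' ∨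
      cellA g h i line j = (g.getD i []).getD j ' ')) := by
  by_cases hd : line.getD j ' ' = '.'
  · left
    refine ⟨hd, ?_⟩
    simp only [List.getD_eq_getElem?_getD] at hd
    simp [cellA, hd]
  · right
    refine ⟨hd, ?_⟩
    simp only [cellA, if_neg hd]
    split_ifs <;> tauto

theorem compat_step (g0 g : List (List Char)) (hC : Compat g0 g) :
    Compat g0 (stepA g) := by
  refine ⟨(shape_stepA g).trans hC.1, ?_⟩
  intro i j
  by_cases hi : i < g.length
  · by_cases hj : j < g[i].length
    · rw [stepA_cell g i j hi hj]
      have hinv := hC.2 i j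
      have hline : g.getD i [] = g[i] := List.getD_eq_getElem g [] hi
      have hlv := cellA_vals g g.length i g[i] j
      rw [← hline] at hlv ⊢
      rcases hlv with ⟨hd, hv⟩ | ⟨hd, hv⟩
      · -- '.' stays '.'
        rcases hinv with h | ⟨_, hbk⟩
        · rw [hv, ← h, hd]; left; rfl
        · rcases hbk with h | h <;> rw [h] at hd <;> exact absurd hd (by decide)
      · have h0 : (g0.getD i []).getD j ' ' ≠ '.' := by
          rcases hinv with h | ⟨hne, _⟩
          · rwa [← h]
          · exact hne
        rcases hv with h | h | h
        · right; exact ⟨h0, Or.inl h⟩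
        · right; exact ⟨h0, Or.inr h⟩
        · rw [h]; exact hinv
    · -- column out of range in g, hence in stepA g and in g0
      have hlen : i < (stepA g).length := by
        have := congrArg List.length (shape_stepA g); simp at this; omega
      have hjs : ¬ j < (stepA g)[i].length := by
        have : (stepA g)[i].length = g[i].length := by
          have h1 := congrArg (fun l => l.getD i 0) (shape_stepA g)
          simpa [List.getD_eq_getElem?_getD, List.getElem?_eq_getElem, hi, hlen] using h1
        omega
      have hj0 : ¬ j < (g0.getD i []).length := by
        have := row_len_eq hC.1 i
        rw [List.getD_eq_getElem g [] hi] at this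
        omega
      left
      rw [List.getD_eq_getElem (stepA g) [] hlen]
      rw [getD_oob (stepA g)[i] j ' ' (by omega), getD_oob (g0.getD i []) j ' ' (by omega)]
  · -- row out of range everywhere
    have hlen0 : g0.length = g.length := glen_eq hC.1
    have hlenS : (stepA g).length = g.length := by
      have := congrArg List.length (shape_stepA g); simpa using this
    left
    rw [getD_oob (stepA g) i [] (by omega), getD_oob g0 i [] (by omega)]

theorem count_go_single (a : Char) (l : List Char) : ∀ (fuel : Nat) (acc : Nat),
    l.length ≤ fuel → PySem.Chars.count.go [a] fuel l acc = acc + l.count a := by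
  induction l with
  | nil => intro fuel acc _; cases fuel <;> simp [PySem.Chars.count.go]
  | cons h t ih =>
    intro fuel acc hf
    match fuel, hf with
    | f + 1, hf =>
      have ht : t.length ≤ f := by simpa using hf
      by_cases hah : a = h
      · subst hah
        simp [PySem.Chars.count.go, List.isPrefixOf, ih f (acc + 1) ht]
        omega
      · simp [PySem.Chars.count.go, List.isPrefixOf, hah, ih f acc ht, Ne.symm hah]

theorem count_single (a : Char) (l : List Char) : PySem.Chars.count l [a] = l.count a := by
  simp [PySem.Chars.count, count_go_single a l l.length 0 le_rfl]

theorem render_count (g : List (List Char)) :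
    ((renderA g).count '#' : Int) = (g.map (fun row => (row.count '#' : Int))).sum := by
  induction g with
  | nil => simp [renderA, PySem.Chars.join_nil]
  | cons r rest ih =>
    cases rest with
    | nil => simp [renderA, PySem.Chars.join_singleton]
    | cons q rs =>
      simp [renderA, PySem.Chars.join_cons_cons] at ih ⊢
      omega

theorem countA_eq_countB (g : List (List Char)) :
    (PySem.Chars.count (renderA g) ['#'] : Int) = countB g := by
  rw [count_single]
  simp only [countB, PySem.List.count_eq]
  exact render_count g

theorem render_inj {g g' : List (List Char)} (hs : g.map List.length = g'.map List.length)
    (h : renderA g = renderA g') : g = g' := by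
  induction g generalizing g' with
  | nil => cases g' <;> simp_all
  | cons r rest ih =>
    cases g' with
    | nil => simp_all
    | cons r' rest' =>
      simp at hs
      obtain ⟨hlen, hrest⟩ := hs
      cases rest with
      | nil =>
        cases rest' with
        | nil => simpa [renderA, PySem.Chars.join_singleton] using h
        | cons q' rs' => simp at hrest
      | cons q rs =>
        cases rest' with
        | nil => simp at hrest
        | cons q' rs' =>
          simp only [renderA, PySem.Chars.join_cons_cons, List.append_assoc] at h
          have h2 := List.append_inj h (by omega)
          obtain ⟨h3, h4⟩ := h2
          have h5 : renderA (q :: rs) = renderA (q' :: rs') := by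
            simpa [renderA] using h4
          have := ih hrest h5
          simp_all

theorem render_nil {g : List (List Char)} (h : renderA g = []) : g = [] ∨ g = [[]] := by
  match g with
  | [] => left; rfl
  | [r] => right; simp [renderA, PySem.Chars.join_singleton] at h; simp [h]
  | r :: q :: rs =>
    exfalso
    simp [renderA, PySem.Chars.join_cons_cons] at h

theorem compat_refl (g : List (List Char)) : Compat g g := ⟨rfl, fun _ _ => Or.inl rfl⟩

theorem loopB_fix (info : List (List (Option (List (List (Nat × Nat))))))
    (g : List (List Char)) (h : stepB info g = g) :
    ∀ f : Nat, loopB info f g = countB g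
  | 0 => rfl
  | f + 1 => by simp [loopB, h]

theorem loop_eq (g0 : List (List Char)) :
    ∀ (f : Nat) (g : List (List Char)) (prev : List Char),
      Compat g0 g → (prev = renderA g → stepA g = g) →
      loopA f prev g = loopB (infoB g0) f g := by
  intro f
  induction f with
  | zero => intro g prev _ _; exact countA_eq_countB g
  | succ f ih =>
    intro g prev hC hcond
    simp only [loopA, loopB]
    by_cases hp : prev = renderA g
    · rw [if_pos hp, if_pos (by rw [← step_eq g0 g hC]; exact hcond hp)]
      exact countA_eq_countB g
    · rw [if_neg hp]
      by_cases hfix : stepA g = g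
      · rw [if_pos (by rw [← step_eq g0 g hC]; exact hfix), hfix,
          ih g (renderA g) hC (fun _ => hfix)]
        exact loopB_fix _ _ (by rw [← step_eq g0 g hC]; exact hfix) f
      · rw [if_neg (by rw [← step_eq g0 g hC]; exact hfix), ← step_eq g0 g hC]
        exact ih (stepA g) (renderA g) (compat_step g0 g hC)
          (fun h => absurd (render_inj (shape_stepA g).symm h) (fun he => hfix he.symm))

theorem part_two_spec' (inputs : List String) : part_two inputs = part_two_alt inputs := by
  simp only [part_two, part_two_alt]
  apply loop_eq _ _ _ _ (compat_refl _)
  intro h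
  rcases render_nil h.symm with h1 | h1 <;> rw [h1] <;> rfl

-- ===== VERDICT (by name: the statement is the Claim_ definition above) =====
theorem part_two_spec : Claim_equal_part_two := by
  intro inputs _
  exact part_two_spec' inputs
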